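-- pv_equiv track=rewrite | github.com/pkanumula/Leetcode | 2249-count-the-hidden-sequences/2249-count-the-hidden-sequences.py | numberOfArrays
-- ===== SOURCE A (Python) =====
-- from typing import List
--
-- def numberOfArrays(differences: List[int], lower: int, upper: int) -> int:
--     min_sum = 0
--     max_sum = 0
--     current = 0
--
--     for diff in differences:
--         current += diff
--         min_sum = min(min_sum, current)
--         max_sum = max(max_sum, current)
--
--     return max(0, (upper - lower) - (max_sum - min_sum) + 1)
-- ===== SOURCE B (Python) =====
-- from typing import List
--
-- def _solve(seg):
--     # divide and conquer: return (total, minPrefix, maxPrefix) for the segment,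
--     # prefixes including the empty prefix 0
--     if len(seg) <= 1:
--         if not seg:
--             return (0, 0, 0)
--         d = seg[0]
--         return (d, min(0, d), max(0, d))
--     m = len(seg) // 2
--     sL, mnL, mxL = _solve(seg[:m])
--     sR, mnR, mxR = _solve(seg[m:])
--     return (sL + sR, min(mnL, sL + mnR), max(mxL, sL + mxR))
--
-- def numberOfArrays(differences: List[int], lower: int, upper: int) -> int:
--     s, mn, mx = _solve(differences)
--     return max(0, (upper - lower) - (mx - mn) + 1)
-- ===== Notes on version B (the rewrite author's own statement) =====
-- stated objective: alternative
-- what changed: Replaces A's single left-to-right fold maintaining running current/min/max with a divide-and-conquer that splits the list in half and merges (sum, minPrefix, maxPrefix) summaries of the two halves with a monoid-style combine.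
import Mathlib
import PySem

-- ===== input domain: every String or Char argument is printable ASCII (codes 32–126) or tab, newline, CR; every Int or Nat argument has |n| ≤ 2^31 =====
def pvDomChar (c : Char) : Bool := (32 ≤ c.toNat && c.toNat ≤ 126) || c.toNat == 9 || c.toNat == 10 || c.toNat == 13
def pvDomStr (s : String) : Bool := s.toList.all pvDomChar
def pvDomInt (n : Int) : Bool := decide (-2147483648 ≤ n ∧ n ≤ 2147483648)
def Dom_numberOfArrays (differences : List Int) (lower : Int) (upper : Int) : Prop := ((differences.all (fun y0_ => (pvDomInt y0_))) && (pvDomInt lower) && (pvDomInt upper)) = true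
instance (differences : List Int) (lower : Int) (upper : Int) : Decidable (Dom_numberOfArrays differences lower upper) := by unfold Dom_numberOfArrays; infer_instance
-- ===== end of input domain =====

-- B replaces A's single left-to-right running-min/max fold with a divide-and-conquer that splits
-- the list in half and merges (sum, minPrefix, maxPrefix) summaries (objective: alternative).


-- ===== PORT A =====
def numberOfArrays (differences : List Int) (lower : Int) (upper : Int) : Int :=
  let s := differences.foldl
    (fun (st : Int × Int × Int) diff =>
      let current := st.2.2 + diff
      (min st.1 current, max st.2.1 current, current))
    (0, 0, 0)
  max 0 ((upper - lower) - (s.2.1 - s.1) + 1)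

-- ===== PORT B =====
-- _solve: divide and conquer, (total, minPrefix, maxPrefix) of a segment, prefixes include 0.
def pvSolve (seg : List Int) : Int × Int × Int :=
  if _h : seg.length ≤ 1 then
    match seg with
    | [] => (0, 0, 0)
    | d :: _ => (d, min 0 d, max 0 d)
  else
    let m := seg.length / 2
    let L := pvSolve (seg.take m)
    let R := pvSolve (seg.drop m)
    (L.1 + R.1, min L.2.1 (L.1 + R.2.1), max L.2.2 (L.1 + R.2.2))
termination_by seg.length
decreasing_by
  · simp [List.length_take]; omega
  · simp [List.length_drop]; omega

def numberOfArrays_alt (differences : List Int) (lower : Int) (upper : Int) : Int :=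
  let r := pvSolve differences
  max 0 ((upper - lower) - (r.2.2 - r.2.1) + 1)

-- ===== PRECONDITION & SPEC =====
def Spec_numberOfArrays (differences : List Int) (lower : Int) (upper : Int) (out : Int) : Prop := out = numberOfArrays_alt differences lower upper
instance (differences : List Int) (lower : Int) (upper : Int) (out : Int) : Decidable (Spec_numberOfArrays differences lower upper out) := by unfold Spec_numberOfArrays; infer_instance

-- ===== CLAIM (what is proved, stated in full; the proofs are below) =====
def Claim_equal_numberOfArrays : Prop := ∀ (differences : List Int) (lower : Int) (upper : Int), Dom_numberOfArrays differences lower upper → Spec_numberOfArrays differences lower upper (numberOfArrays differences lower upper)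

-- ===== LEMMAS AND PROOFS =====

/-- The D&C summary is well-formed: minPrefix ≤ 0 ≤ maxPrefix and minPrefix ≤ total ≤ maxPrefix. -/
theorem pvSolve_bounds (l : List Int) :
    (pvSolve l).2.1 ≤ 0 ∧ 0 ≤ (pvSolve l).2.2 ∧
    (pvSolve l).2.1 ≤ (pvSolve l).1 ∧ (pvSolve l).1 ≤ (pvSolve l).2.2 := by
  by_cases h : l.length ≤ 1
  · cases l with
    | nil => simp [pvSolve]
    | cons d t =>
        have ht : t = [] := by cases t with | nil => rfl | cons a s => simp at h
        subst ht
        have h1 : pvSolve [d] = (d, min 0 d, max 0 d) := by rw [pvSolve]; rfl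
        rw [h1]
        refine ⟨?_, ?_, ?_, ?_⟩ <;> simp
  · have hT := pvSolve_bounds (l.take (l.length / 2))
    have hD := pvSolve_bounds (l.drop (l.length / 2))
    have hps : pvSolve l =
        ((pvSolve (l.take (l.length / 2))).1 + (pvSolve (l.drop (l.length / 2))).1,
         min (pvSolve (l.take (l.length / 2))).2.1
             ((pvSolve (l.take (l.length / 2))).1 + (pvSolve (l.drop (l.length / 2))).2.1),
         max (pvSolve (l.take (l.length / 2))).2.2
             ((pvSolve (l.take (l.length / 2))).1 + (pvSolve (l.drop (l.length / 2))).2.2)) := by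
      conv_lhs => rw [pvSolve]
      rw [dif_neg h]
    rw [hps]
    refine ⟨?_, ?_, ?_, ?_⟩ <;> simp <;> omega
termination_by l.length
decreasing_by
  · simp [List.length_take]; omega
  · simp [List.length_drop]; omega

/-- A's fold from any state (mn, mx, cur) with mn ≤ cur ≤ mx computes B's segment summary. -/
theorem foldA_eq (l : List Int) (mn mx cur : Int) (h1 : mn ≤ cur) (h2 : cur ≤ mx) :
    l.foldl
      (fun (st : Int × Int × Int) diff =>
        let current := st.2.2 + diff
        (min st.1 current, max st.2.1 current, current))
      (mn, mx, cur)
    = (min mn (cur + (pvSolve l).2.1), max mx (cur + (pvSolve l).2.2), cur + (pvSolve l).1) := by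
  by_cases h : l.length ≤ 1
  · cases l with
    | nil =>
        have h0 : pvSolve ([] : List Int) = (0, 0, 0) := by rw [pvSolve]; rfl
        rw [h0]
        simp
        omega
    | cons d t =>
        have ht : t = [] := by cases t with | nil => rfl | cons a s => simp at h
        subst ht
        have hd : pvSolve [d] = (d, min 0 d, max 0 d) := by rw [pvSolve]; rfl
        rw [hd]
        refine Prod.ext ?_ (Prod.ext ?_ ?_) <;> simp [List.foldl] <;> omega
  · have hlt1 : (l.take (l.length / 2)).length < l.length := by
      simp [List.length_take]; omega
    have hlt2 : (l.drop (l.length / 2)).length < l.length := by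
      simp [List.length_drop]; omega
    have bT := pvSolve_bounds (l.take (l.length / 2))
    have bD := pvSolve_bounds (l.drop (l.length / 2))
    have hps : pvSolve l =
        ((pvSolve (l.take (l.length / 2))).1 + (pvSolve (l.drop (l.length / 2))).1,
         min (pvSolve (l.take (l.length / 2))).2.1
             ((pvSolve (l.take (l.length / 2))).1 + (pvSolve (l.drop (l.length / 2))).2.1),
         max (pvSolve (l.take (l.length / 2))).2.2
             ((pvSolve (l.take (l.length / 2))).1 + (pvSolve (l.drop (l.length / 2))).2.2)) := by
      conv_lhs => rw [pvSolve]
      rw [dif_neg h]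
    conv_lhs => rw [← List.take_append_drop (l.length / 2) l]
    rw [List.foldl_append]
    rw [foldA_eq (l.take (l.length / 2)) mn mx cur h1 h2]
    rw [foldA_eq (l.drop (l.length / 2)) _ _ _ (by omega) (by omega)]
    rw [hps]
    refine Prod.ext ?_ (Prod.ext ?_ ?_) <;> simp <;> omega
termination_by l.length
decreasing_by
  · exact hlt1
  · exact hlt2

-- ===== VERDICT (by name: the statement is the Claim_ definition above) =====
theorem numberOfArrays_spec : Claim_equal_numberOfArrays := by
  intro differences lower upper _
  unfold Spec_numberOfArrays numberOfArrays numberOfArrays_alt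
  rw [foldA_eq differences 0 0 0 le_rfl le_rfl]
  have hb := pvSolve_bounds differences
  simp only []
  omega
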